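-- pv_equiv track=rewrite | github.com/RamananVr/Leetcodepython | arrays_sliding_window/2504_concatenate_the_subarray_of_length_k.py | largest_concatenated_subarray
-- ===== SOURCE A (Python) =====
-- def largest_concatenated_subarray(nums, k):
--     """
--     Finds the lexicographically largest string formed by concatenating the elements
--     of a subarray of length k from the array nums.
--
--     :param nums: List[int] - The input array of single-digit integers.
--     :param k: int - The length of the subarray to consider.
--     :return: str - The lexicographically largest string.
--     """
--     n = len(nums)
--     max_string = ""
--
--     for i in range(n - k + 1):
--         # Extract the subarray of length k
--         subarray = nums[i:i + k]
--         # Convert the subarray to a string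
--         subarray_string = ''.join(map(str, subarray))
--         # Update the max_string if the current subarray_string is larger
--         if subarray_string > max_string:
--             max_string = subarray_string
--
--     return max_string
-- ===== SOURCE B (Python) =====
-- def largest_concatenated_subarray(nums, k):
--     n = len(nums)
--     if k <= 0 or k > n:
--         return ""
--     pieces = [str(x) for x in nums]
--     offs = [0]
--     total = 0
--     for p in pieces:
--         total += len(p)
--         offs.append(total)
--     full = ''.join(pieces)
--     best = full[offs[0]:offs[k]]
--     for i in range(1, n - k + 1):
--         cand = full[offs[i]:offs[i + k]]
--         if cand > best:
--             best = cand
--     return best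
-- ===== Notes on version B (the rewrite author's own statement) =====
-- stated objective: faster
-- what changed: Instead of rebuilding each window by slicing the list, str()-converting and joining it, B converts every number to a string once, concatenates them once, records prefix-length offsets, and reads each window as a single slice full[offs[i]:offs[i+k]] (plus an explicit guard that returns '' when no window of length k exists).
-- intended difference: For k < 0 with -k < len(nums), Python's negative-slice wraparound makes nums[i:i+k] a nonempty accidental chunk and A returns its concatenation (e.g. A([1,2],-1)='1'), while B returns '' because no window of negative length exists; B's value is the intended one. — e.g. on largest_concatenated_subarray([1, 2], -1): A returns "1", B returns ""
import Mathlib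
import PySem

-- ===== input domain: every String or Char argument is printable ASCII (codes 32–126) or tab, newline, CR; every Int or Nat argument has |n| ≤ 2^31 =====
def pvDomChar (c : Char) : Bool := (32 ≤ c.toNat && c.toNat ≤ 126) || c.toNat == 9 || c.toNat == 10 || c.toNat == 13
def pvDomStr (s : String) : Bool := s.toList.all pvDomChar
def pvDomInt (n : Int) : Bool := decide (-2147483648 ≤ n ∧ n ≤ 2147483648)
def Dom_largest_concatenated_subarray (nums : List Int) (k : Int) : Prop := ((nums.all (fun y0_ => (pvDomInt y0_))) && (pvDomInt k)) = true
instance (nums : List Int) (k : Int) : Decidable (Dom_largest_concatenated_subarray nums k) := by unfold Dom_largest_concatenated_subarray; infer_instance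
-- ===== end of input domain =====

-- B replaces A's per-window slice/str/join rebuild by one precomputed concatenation with
-- prefix-length offsets, each window being a single slice of it (objective: alternative).

-- ===== PORT A =====
def largest_concatenated_subarray (nums : List Int) (k : Int) : String :=
  let n : Int := PySem.List.len nums
  (PySem.List.pyRange 0 (n - k + 1) 1).foldl
    (fun max_string i =>
      let subarray := PySem.List.slice nums (some i) (some (i + k))
      let subarray_string := PySem.Str.join "" (subarray.map PySem.Int.toStr)
      -- Python's 'subarray_string > max_string' is String '<' with the sides swapped (exact)
      if max_string < subarray_string then subarray_string else max_string)
    ""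

-- ===== PORT B =====
def largest_concatenated_subarray_alt (nums : List Int) (k : Int) : String :=
  let n : Int := PySem.List.len nums
  if k ≤ 0 ∨ n < k then ""
  else
    let pieces := nums.map PySem.Int.toStr
    let st := pieces.foldl
      (fun (acc : List Int × Int) p =>
        (acc.1 ++ [acc.2 + PySem.Str.len p], acc.2 + PySem.Str.len p)) ([0], 0)
    let offs := st.1
    let full := PySem.Str.join "" pieces
    let best := PySem.Str.slice full (some (PySem.List.pyGetD offs 0 0))
      (some (PySem.List.pyGetD offs k 0))
    (PySem.List.pyRange 1 (n - k + 1) 1).foldl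
      (fun best i =>
        let cand := PySem.Str.slice full (some (PySem.List.pyGetD offs i 0))
          (some (PySem.List.pyGetD offs (i + k) 0))
        if best < cand then cand else best)
      best

-- ===== PRECONDITION & SPEC =====
-- For negative k with -k < len(nums), A's Python-slice wraparound makes nums[i:i+k] a
-- nonempty accidental chunk and A returns its concatenation, while B returns "" because
-- no window of negative length exists; B's value is the intended one.
def D_largest_concatenated_subarray (nums : List Int) (k : Int) : Prop :=
  k < 0 ∧ 0 < (nums.length : Int) + k
instance (nums : List Int) (k : Int) : Decidable (D_largest_concatenated_subarray nums k) := by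
  unfold D_largest_concatenated_subarray; infer_instance

def Spec_largest_concatenated_subarray (nums : List Int) (k : Int) (out : String) : Prop :=
  ¬ D_largest_concatenated_subarray nums k → out = largest_concatenated_subarray_alt nums k
instance (nums : List Int) (k : Int) (out : String) : Decidable (Spec_largest_concatenated_subarray nums k out) := by
  unfold Spec_largest_concatenated_subarray; infer_instance

def pvDiffWitness_largest_concatenated_subarray : List Int × Int := ([1, 2], -1)
def pvDiffWitnessOut_largest_concatenated_subarray : String × String := ("1", "")

-- ===== CLAIM (what is proved, stated in full; the proofs are below) =====
def Claim_unchanged_largest_concatenated_subarray : Prop := ∀ (nums : List Int) (k : Int), Dom_largest_concatenated_subarray nums k → Spec_largest_concatenated_subarray nums k (largest_concatenated_subarray nums k)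
def Claim_changed_largest_concatenated_subarray : Prop := Dom_largest_concatenated_subarray (pvDiffWitness_largest_concatenated_subarray.1) (pvDiffWitness_largest_concatenated_subarray.2) ∧ D_largest_concatenated_subarray (pvDiffWitness_largest_concatenated_subarray.1) (pvDiffWitness_largest_concatenated_subarray.2) ∧ largest_concatenated_subarray (pvDiffWitness_largest_concatenated_subarray.1) (pvDiffWitness_largest_concatenated_subarray.2) = pvDiffWitnessOut_largest_concatenated_subarray.1 ∧ largest_concatenated_subarray_alt (pvDiffWitness_largest_concatenated_subarray.1) (pvDiffWitness_largest_concatenated_subarray.2) = pvDiffWitnessOut_largest_concatenated_subarray.2 ∧ pvDiffWitnessOut_largest_concatenated_subarray.1 ≠ pvDiffWitnessOut_largest_concatenated_subarray.2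
def Claim_exact_largest_concatenated_subarray : Prop := ∀ (nums : List Int) (k : Int), Dom_largest_concatenated_subarray nums k → D_largest_concatenated_subarray nums k → largest_concatenated_subarray nums k ≠ largest_concatenated_subarray_alt nums k

-- ===== LEMMAS AND PROOFS =====

-- A's window string at index i
def pvCandA (nums : List Int) (k i : Int) : String :=
  PySem.Str.join "" ((PySem.List.slice nums (some i) (some (i + k))).map PySem.Int.toStr)

-- char-list pieces and prefix-sum offsets
def pvCss (nums : List Int) : List (List Char) := nums.map PySem.Int.toChars
def pvOffN (nums : List Int) (j : Nat) : Nat := (((pvCss nums).map List.length).take j).sum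

lemma pv_str_ext {s t : String} (h : s.toList = t.toList) : s = t := by
  rw [← String.ofList_toList (s := s), ← String.ofList_toList (s := t), h]

lemma pv_empty_toList : ("" : String).toList = [] := rfl

lemma pv_empty_lt (s : String) (h : s ≠ "") : "" < s := by
  have hne : s.toList ≠ [] := fun hs => h (pv_str_ext (by rw [hs, pv_empty_toList]))
  rcases List.exists_cons_of_ne_nil hne with ⟨a, t, hat⟩
  rw [String.lt_iff_toList_lt, pv_empty_toList, hat]
  exact List.nil_lt_cons a t

lemma pv_not_lt_empty (s : String) : ¬ s < "" := by
  rw [String.lt_iff_toList_lt, pv_empty_toList]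
  intro h
  have h' := (List.lt_iff_lex_lt _ _).mp h
  generalize hg : s.toList = l at h'
  cases h'

lemma pv_foldl_ne_empty (c : Int → String) (l : List Int) (acc : String) (h : acc ≠ "") :
    l.foldl (fun m i => if m < c i then c i else m) acc ≠ "" := by
  induction l generalizing acc with
  | nil => exact h
  | cons a t ih =>
    rw [List.foldl_cons]
    refine ih _ ?_
    change (if acc < c a then c a else acc) ≠ ""
    intro h0
    split at h0
    · rename_i hlt
      rw [h0] at hlt
      exact pv_not_lt_empty acc hlt
    · exact h h0

lemma pv_foldl_all_empty (c : Int → String) (l : List Int) (h : ∀ i ∈ l, c i = "") :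
    l.foldl (fun m i => if m < c i then c i else m) "" = "" := by
  induction l with
  | nil => rfl
  | cons a t ih =>
    have ha := h a (List.mem_cons_self)
    simp only [List.foldl_cons, ha, lt_irrefl]
    exact ih (fun i hi => h i (List.mem_cons_of_mem _ hi))

lemma pv_toDigitsCore_ne_nil (b f n : Nat) (l : List Char) (h : l ≠ []) :
    Nat.toDigitsCore b f n l ≠ [] := by
  induction f generalizing n l with
  | zero => simpa [Nat.toDigitsCore]
  | succ f ih =>
    simp only [Nat.toDigitsCore]
    split
    · simp
    · exact ih _ _ (by simp)

lemma pv_toDigits_ne_nil (b n : Nat) : Nat.toDigits b n ≠ [] := by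
  by_cases h : n / b = 0
  · simp [Nat.toDigits, Nat.toDigitsCore, h]
  · simp only [Nat.toDigits, Nat.toDigitsCore, h, if_false]
    exact pv_toDigitsCore_ne_nil _ _ _ _ (by simp)

lemma pv_toChars_ne_nil (n : Int) : PySem.Int.toChars n ≠ [] := by
  unfold PySem.Int.toChars
  split
  · simp
  · exact pv_toDigits_ne_nil _ _

lemma pv_offs_aux (ps : List String) (pre : List Int) (t : Int) :
    ps.foldl (fun (acc : List Int × Int) p =>
        (acc.1 ++ [acc.2 + PySem.Str.len p], acc.2 + PySem.Str.len p)) (pre, t)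
    = (pre ++ (List.range ps.length).map
        (fun j => t + ((ps.map PySem.Str.len).take (j + 1)).sum),
       t + (ps.map PySem.Str.len).sum) := by
  induction ps generalizing pre t with
  | nil => simp
  | cons p ps ih =>
    simp only [List.foldl_cons, ih, List.map_cons, List.sum_cons, List.length_cons,
      List.range_succ_eq_map, List.map_map]
    rw [Prod.mk.injEq]
    refine ⟨?_, by ring⟩
    simp [Function.comp, List.take_succ_cons, List.append_assoc, add_assoc]

lemma pv_offs_eq (ps : List String) :
    (ps.foldl (fun (acc : List Int × Int) p =>
        (acc.1 ++ [acc.2 + PySem.Str.len p], acc.2 + PySem.Str.len p)) ([0], 0)).1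
    = (List.range (ps.length + 1)).map (fun j => ((ps.map PySem.Str.len).take j).sum) := by
  rw [pv_offs_aux]
  simp [List.range_succ_eq_map, List.map_map, Function.comp]

lemma pv_len_toStr (x : Int) :
    PySem.Str.len (PySem.Int.toStr x) = ((PySem.Int.toChars x).length : Int) := by
  rw [PySem.Str.len_eq, ← PySem.Int.toList_toStr x]

lemma pv_off_cast (nums : List Int) (j : Nat) :
    (((nums.map PySem.Int.toStr).map PySem.Str.len).take j).sum = (pvOffN nums j : Int) := by
  unfold pvOffN pvCss
  rw [List.map_map, List.map_map, ← List.map_take, ← List.map_take, Nat.cast_list_sum,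
    List.map_map]
  congr 1
  apply List.map_congr_left
  intro x _
  exact pv_len_toStr x

lemma pv_join_nil_flatten (css : List (List Char)) : PySem.Chars.join [] css = css.flatten := by
  induction css with
  | nil => rfl
  | cons c cs ih =>
    cases cs with
    | nil => simp [PySem.Chars.join, List.intercalate, List.intersperse]
    | cons d t =>
      simp only [PySem.Chars.join, List.intercalate, List.intersperse] at ih ⊢
      simp only [List.flatten_cons, List.nil_append]
      rw [ih]
      simp [List.flatten_cons]

lemma pv_full_toList (nums : List Int) :
    (PySem.Str.join "" (nums.map PySem.Int.toStr)).toList = (pvCss nums).flatten := by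
  rw [PySem.Str.toList_join]
  have hmap : (nums.map PySem.Int.toStr).map String.toList = pvCss nums := by
    unfold pvCss
    rw [List.map_map]
    apply List.map_congr_left
    intro x _
    exact PySem.Int.toList_toStr x
  rw [hmap]
  exact pv_join_nil_flatten _

lemma pv_window_chars (css : List (List Char)) (i m : Nat) :
    (css.flatten.drop (((css.map List.length).take i).sum)).take
        ((((css.map List.length).take (i + m)).sum) - (((css.map List.length).take i).sum))
    = ((css.drop i).take m).flatten := by
  rw [List.drop_sum_flatten]
  have hsplit : ((css.map List.length).take (i + m)).sum
      = ((css.map List.length).take i).sum + (((css.drop i).map List.length).take m).sum := by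
    rw [List.take_add, List.sum_append, List.map_drop]
  rw [hsplit, Nat.add_sub_cancel_left, List.take_sum_flatten]

-- A's candidate at a nonnegative index whose window lies inside the list,
-- as a slice of the full concatenated string between two prefix offsets
lemma pv_cand_eq (nums : List Int) (kN iN : Nat) (_h : iN + kN ≤ nums.length) :
    PySem.Str.slice (PySem.Str.join "" (nums.map PySem.Int.toStr))
        (some ((pvOffN nums iN : Nat) : Int)) (some ((pvOffN nums (iN + kN) : Nat) : Int))
    = pvCandA nums (kN : Int) (iN : Int) := by
  unfold pvCandA
  have hslice : PySem.List.slice nums (some (iN : Int)) (some ((iN : Int) + (kN : Int)))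
      = (nums.drop iN).take kN := by
    have hc : (iN : Int) + (kN : Int) = ((iN + kN : Nat) : Int) := by omega
    rw [hc, PySem.List.slice_natCast, Nat.add_sub_cancel_left]
  rw [hslice]
  apply pv_str_ext
  rw [PySem.Str.toList_slice, PySem.Chars.slice_eq_listSlice, pv_full_toList,
    PySem.List.slice_natCast]
  unfold pvOffN
  rw [pv_window_chars]
  have hmap : (((nums.drop iN).take kN).map PySem.Int.toStr).map String.toList
      = ((pvCss nums).drop iN).take kN := by
    unfold pvCss
    rw [List.map_map]
    have h1 : List.map (String.toList ∘ PySem.Int.toStr) (List.take kN (List.drop iN nums))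
        = List.map PySem.Int.toChars (List.take kN (List.drop iN nums)) := by
      apply List.map_congr_left
      intro x _
      exact PySem.Int.toList_toStr x
    rw [h1]
    simp [List.map_take, List.map_drop]
  rw [PySem.Str.toList_join, hmap]
  exact (pv_join_nil_flatten _).symm

lemma pv_join_ne_empty (l : List Int) (h : l ≠ []) :
    PySem.Str.join "" (l.map PySem.Int.toStr) ≠ "" := by
  cases l with
  | nil => exact absurd rfl h
  | cons x xs =>
    intro h0
    have h1 : (pvCss (x :: xs)).flatten = [] := by
      rw [← pv_full_toList, h0]; rfl
    unfold pvCss at h1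
    simp only [List.map_cons, List.flatten_cons, List.append_eq_nil_iff] at h1
    exact pv_toChars_ne_nil x h1.1

-- empty windows: nums[i:i+k] with 0 ≤ i, k ≤ 0 and (k = 0 or len + k ≤ 0) is []
lemma pv_slice_empty (nums : List Int) (k i : Int) (hi : 0 ≤ i) (hk : k ≤ 0)
    (h : k = 0 ∨ (nums.length : Int) + k ≤ 0) :
    PySem.List.slice nums (some i) (some (i + k)) = [] := by
  apply List.eq_nil_of_length_eq_zero
  rw [PySem.List.length_slice]
  have hle : PySem.List.clampIdx nums.length (i + k) ≤ PySem.List.clampIdx nums.length i := by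
    unfold PySem.List.clampIdx
    rcases h with h | h <;> split_ifs <;> omega
  omega

-- A as a fold of window strings
lemma pv_a_unfold (nums : List Int) (k : Int) :
    largest_concatenated_subarray nums k
    = (PySem.List.pyRange 0 ((nums.length : Int) - k + 1) 1).foldl
        (fun m i => if m < pvCandA nums k i then pvCandA nums k i else m) "" := by
  simp only [largest_concatenated_subarray, pvCandA, PySem.List.len_eq]

-- B in the feasible case, as the same fold started at window 0
lemma pv_alt_main (nums : List Int) (kN : Nat) (hk : 0 < kN) (hkn : kN ≤ nums.length) :
    largest_concatenated_subarray_alt nums (kN : Int)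
    = (PySem.List.pyRange 1 ((nums.length : Int) - (kN : Int) + 1) 1).foldl
        (fun m i => if m < pvCandA nums (kN : Int) i then pvCandA nums (kN : Int) i else m)
        (pvCandA nums (kN : Int) ((0 : Nat) : Int)) := by
  have hguard : ¬ ((kN : Int) ≤ 0 ∨ ((nums.length : Int)) < (kN : Int)) := by
    rintro (h | h) <;> omega
  simp only [largest_concatenated_subarray_alt, PySem.List.len_eq, if_neg hguard]
  rw [pv_offs_eq]
  have hlen : (nums.map PySem.Int.toStr).length = nums.length := by simp
  rw [hlen]
  have hget : ∀ jN : Nat, jN ≤ nums.length →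
      PySem.List.pyGetD ((List.range (nums.length + 1)).map
        (fun j => (((nums.map PySem.Int.toStr).map PySem.Str.len).take j).sum)) (jN : Int) 0
      = ((pvOffN nums jN : Nat) : Int) := by
    intro jN hj
    rw [PySem.List.pyGetD_natCast, PySem.List.getD_map_range _ _ _ _ (by omega)]
    exact pv_off_cast nums jN
  have h0 : PySem.List.pyGetD ((List.range (nums.length + 1)).map
      (fun j => (((nums.map PySem.Int.toStr).map PySem.Str.len).take j).sum)) 0 0
      = ((pvOffN nums 0 : Nat) : Int) := by
    have h00 := hget 0 (Nat.zero_le _)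
    simpa using h00
  have hkg := hget kN hkn
  rw [h0, hkg]
  have hc0 := pv_cand_eq nums kN 0 (by omega)
  rw [Nat.zero_add] at hc0
  rw [hc0]
  apply PySem.List.foldl_congr_mem
  intro acc i hi
  have hi' := (PySem.List.mem_pyRange_one).mp hi
  obtain ⟨iN, rfl⟩ : ∃ iN : Nat, i = (iN : Int) :=
    ⟨i.toNat, (Int.toNat_of_nonneg (by omega)).symm⟩
  have hik : iN + kN ≤ nums.length := by
    rcases hi' with ⟨h1, h2⟩
    omega
  have hplus : (iN : Int) + (kN : Int) = ((iN + kN : Nat) : Int) := by omega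
  rw [hget iN (by omega), hplus, hget (iN + kN) hik, pv_cand_eq nums kN iN hik]

theorem largest_concatenated_subarray_spec : Claim_unchanged_largest_concatenated_subarray := by
  intro nums k _ hnd
  unfold D_largest_concatenated_subarray at hnd
  by_cases hkn : (nums.length : Int) < k
  · have hA : largest_concatenated_subarray nums k = "" := by
      rw [pv_a_unfold, PySem.List.pyRange_one_eq_nil (by omega)]
      rfl
    have hB : largest_concatenated_subarray_alt nums k = "" := by
      simp only [largest_concatenated_subarray_alt, PySem.List.len_eq, if_pos (Or.inr hkn)]
    rw [hA, hB]
  · by_cases hk0 : k ≤ 0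
    · have hD' : k = 0 ∨ (nums.length : Int) + k ≤ 0 := by omega
      have hA : largest_concatenated_subarray nums k = "" := by
        rw [pv_a_unfold]
        apply pv_foldl_all_empty
        intro i hi
        have hi' := (PySem.List.mem_pyRange_one).mp hi
        unfold pvCandA
        rw [pv_slice_empty nums k i (by omega) hk0 hD']
        rfl
      have hB : largest_concatenated_subarray_alt nums k = "" := by
        simp only [largest_concatenated_subarray_alt, PySem.List.len_eq, if_pos (Or.inl hk0)]
      rw [hA, hB]
    · obtain ⟨kN, rfl⟩ : ∃ kN : Nat, k = (kN : Int) :=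
        ⟨k.toNat, (Int.toNat_of_nonneg (by omega)).symm⟩
      have hk : 0 < kN := by omega
      have hkn' : kN ≤ nums.length := by omega
      rw [pv_alt_main nums kN hk hkn', pv_a_unfold,
        PySem.List.pyRange_one_cons (by omega)]
      simp only [List.foldl_cons]
      rw [show (0 : Int) + 1 = 1 by norm_num]
      have hinit : (if "" < pvCandA nums (kN : Int) 0 then pvCandA nums (kN : Int) 0 else "")
          = pvCandA nums (kN : Int) ((0 : Nat) : Int) := by
        rw [Nat.cast_zero]
        by_cases hc : pvCandA nums (kN : Int) 0 = ""
        · rw [hc]; simp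
        · rw [if_pos (pv_empty_lt _ hc)]
      rw [hinit]

theorem largest_concatenated_subarray_changed : Claim_changed_largest_concatenated_subarray := by
  unfold Claim_changed_largest_concatenated_subarray
  refine ⟨by decide, by decide, ?_, ?_, by decide⟩
  · show largest_concatenated_subarray [1, 2] (-1) = "1"
    rw [pv_a_unfold]
    rw [show PySem.List.pyRange 0 (((([1, 2] : List Int)).length : Int) - (-1) + 1) 1
        = [0, 1, 2, 3] by decide]
    simp only [List.foldl_cons, List.foldl_nil]
    unfold pvCandA
    rw [show PySem.List.slice ([1, 2] : List Int) (some 0) (some (0 + -1)) = [1] by decide]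
    rw [show PySem.List.slice ([1, 2] : List Int) (some 1) (some (1 + -1)) = [] by decide]
    rw [show PySem.List.slice ([1, 2] : List Int) (some 2) (some (2 + -1)) = [] by decide]
    rw [show PySem.List.slice ([1, 2] : List Int) (some 3) (some (3 + -1)) = [] by decide]
    rw [show PySem.Str.join "" (List.map PySem.Int.toStr [1]) = "1" by decide]
    rw [show PySem.Str.join "" (List.map PySem.Int.toStr ([] : List Int)) = "" by decide]
    rw [if_pos (pv_empty_lt "1" (by decide))]
    rw [if_neg (pv_not_lt_empty "1"), if_neg (pv_not_lt_empty "1"),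
      if_neg (pv_not_lt_empty "1")]
  · show largest_concatenated_subarray_alt [1, 2] (-1) = ""
    simp only [largest_concatenated_subarray_alt, PySem.List.len_eq]
    rw [if_pos (Or.inl (by norm_num))]

theorem largest_concatenated_subarray_tight : Claim_exact_largest_concatenated_subarray := by
  intro nums k _ hD
  unfold D_largest_concatenated_subarray at hD
  obtain ⟨hk, hn⟩ := hD
  have hB : largest_concatenated_subarray_alt nums k = "" := by
    simp only [largest_concatenated_subarray_alt, PySem.List.len_eq,
      if_pos (Or.inl (le_of_lt hk))]
  rw [hB, pv_a_unfold, PySem.List.pyRange_one_cons (by omega)]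
  simp only [List.foldl_cons]
  have hc0 : pvCandA nums k 0 ≠ "" := by
    unfold pvCandA
    rw [show (0 : Int) + k = k by ring]
    obtain ⟨kN, hkN⟩ : ∃ kN : Nat, k = -(kN : Int) := ⟨(-k).toNat, by omega⟩
    have hkNpos : 0 < kN := by omega
    rw [hkN, PySem.List.slice_zero_start, PySem.List.slice_to_neg_natCast _ _ hkNpos]
    apply pv_join_ne_empty
    intro hnil
    have hlen := congrArg List.length hnil
    simp only [List.length_take, List.length_nil] at hlen
    omega
  rw [if_pos (pv_empty_lt _ hc0)]
  exact pv_foldl_ne_empty _ _ _ hc0
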